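-- pv_equiv track=rewrite | github.com/DataManagementLab/BespokeOLAP | utils/truncate_model_log.py | truncate_model_final_output
-- ===== SOURCE A (Python) =====
-- def truncate_model_final_output(log: str, num_keep_lines_per_code_block: int = 20):
--     begin_tag = "<BEGIN_FILES>"
--     end_tags = ["<END_FILES>", "</END_FILES>"]
--
--     result_parts = []
--     pos = 0
--
--     while True:
--         begin_idx = log.find(begin_tag, pos)
--         if begin_idx == -1:
--             # no more blocks; append remainder and stop
--             result_parts.append(log[pos:])
--             break
--
--         # go over the end tags and find the closest one
--         end_idxs = []
--         for end_tag in end_tags: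
--             idx = log.find(end_tag, begin_idx)
--             if idx != -1:
--                 end_idxs.append((idx, end_tag))
--
--         end_idx = min(end_idxs, key=lambda x: x[0])[0] if end_idxs else -1
--         end_tag = min(end_idxs, key=lambda x: x[0])[1] if end_idxs else None
--
--         if end_idx == -1:
--             # unmatched begin; append remainder and stop (leave as-is)
--             result_parts.append(log[pos:])
--             break
--
--         # append content before the block
--         result_parts.append(log[pos:begin_idx])
--
--         # extract the block including tags
--         assert end_tag is not None, "End tag should not be None if end_idx is valid"
--         between = log[begin_idx : end_idx + len(end_tag)]
--
--         # truncate the block to num_keep_lines_per_code_block lines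
--         between_lines = between.splitlines()
--         if len(between_lines) > num_keep_lines_per_code_block:
--             truncated_between = (
--                 "\n".join(between_lines[:num_keep_lines_per_code_block])
--                 + "\n...[truncated]...\n"
--             )
--         else:
--             truncated_between = between
--
--         result_parts.append(truncated_between)
--
--         # advance past the end tag
--         pos = end_idx + len(end_tag)
--
--     return "".join(result_parts)
-- ===== SOURCE B (Python) =====
-- def truncate_model_final_output(log: str, num_keep_lines_per_code_block: int = 20):
--     begin_tag = "<BEGIN_FILES>"
--
--     def end_pos(s):
--         # earliest end tag in s, as (index, tag_length); ties cannot occur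
--         best = None
--         for tag in ("<END_FILES>", "</END_FILES>"):
--             i = s.find(tag)
--             if i != -1 and (best is None or i < best[0]):
--                 best = (i, len(tag))
--         return best
--
--     def trunc(block):
--         lines = block.splitlines()
--         if len(lines) > num_keep_lines_per_code_block:
--             return "\n".join(lines[:num_keep_lines_per_code_block]) + "\n...[truncated]...\n"
--         return block
--
--     segs = log.split(begin_tag)
--     out = [segs[0]]
--     rest = segs[1:]
--     while rest:
--         body = rest.pop(0)
--         ep = end_pos(body)
--         while ep is None and rest:
--             body = body + begin_tag + rest.pop(0)
--             ep = end_pos(body)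
--         if ep is None:
--             out.append(begin_tag + body)
--         else:
--             cut = ep[0] + ep[1]
--             out.append(trunc(begin_tag + body[:cut]))
--             out.append(body[cut:])
--     return "".join(out)
-- ===== Notes on version B (the rewrite author's own statement) =====
-- stated objective: alternative
-- what changed: A scans the log with an index-based while loop (find begin tag from pos, find the nearest end tag, slice, advance pos); B instead splits the log once on the begin tag and folds over the resulting segment list, merging consecutive segments while no end tag is present and truncating at the first end tag of the merged segment.
import Mathlib
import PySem

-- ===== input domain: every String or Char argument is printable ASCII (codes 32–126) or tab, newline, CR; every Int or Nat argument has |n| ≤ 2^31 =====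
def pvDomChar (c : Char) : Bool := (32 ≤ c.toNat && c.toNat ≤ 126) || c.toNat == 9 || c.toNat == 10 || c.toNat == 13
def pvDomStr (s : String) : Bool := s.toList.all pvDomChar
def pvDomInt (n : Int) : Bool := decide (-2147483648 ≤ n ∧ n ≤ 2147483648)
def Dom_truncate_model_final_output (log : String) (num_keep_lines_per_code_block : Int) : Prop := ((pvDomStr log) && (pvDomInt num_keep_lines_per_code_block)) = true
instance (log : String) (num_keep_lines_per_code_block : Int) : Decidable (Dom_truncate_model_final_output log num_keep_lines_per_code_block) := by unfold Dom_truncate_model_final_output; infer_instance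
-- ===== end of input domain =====

-- B replaces A's index-based while-loop (find begin tag from pos, find nearest end tag, advance pos)
-- by splitting the log once on the begin tag and folding over the segment list, merging segments that
-- lack an end tag; objective: alternative (same cost, different traversal).

-- ===== PORT A =====

-- the literal tags of the Python source (shared literal constants of both programs)
def pvBEGIN : List Char := "<BEGIN_FILES>".toList
def pvEND1 : List Char := "<END_FILES>".toList
def pvEND2 : List Char := "</END_FILES>".toList

-- A's inner `for end_tag in end_tags: idx = log.find(end_tag, begin_idx); if idx != -1: end_idxs.append(...)`
def pvAEndIdxs (logC : List Char) (bi : Int) : List (Int × List Char) :=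
  [pvEND1, pvEND2].foldl (fun acc tag =>
    let idx := PySem.Chars.findFrom logC tag bi
    if idx ≠ -1 then acc ++ [(idx, tag)] else acc) []

-- A's truncation of one block (`between.splitlines()` …), exactly as written inline in A
def pvATruncBlock (n : Int) (between : List Char) : List Char :=
  let lines := PySem.Chars.splitlines between
  if (lines.length : Int) > n then
    PySem.Chars.join "\n".toList (PySem.List.slice lines none (some n)) ++ "\n...[truncated]...\n".toList
  else between

-- A's `while True:` loop; fuel is a totality guard only (the loop advances pos past the end tag
-- each iteration, so `length+1` fuel is never exhausted); the fuel-0 branch repeats the break branch.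
def pvALoop (logC : List Char) (n : Int) (fuel : Nat) (pos : Int) (acc : List (List Char)) : List Char :=
  match fuel with
  | 0 => PySem.Chars.join [] (acc ++ [PySem.List.slice logC (some pos) none])
  | fuel + 1 =>
    let bi := PySem.Chars.findFrom logC pvBEGIN pos
    if bi = -1 then
      PySem.Chars.join [] (acc ++ [PySem.List.slice logC (some pos) none])
    else
      let endIdxs := pvAEndIdxs logC bi
      let endIdx : Int := if endIdxs = [] then -1 else (PySem.List.minD endIdxs (fun x => x.1) (-1, [])).1
      if endIdx = -1 then
        PySem.Chars.join [] (acc ++ [PySem.List.slice logC (some pos) none])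
      else
        let endTag := (PySem.List.minD endIdxs (fun x => x.1) (-1, [])).2
        let between := PySem.List.slice logC (some bi) (some (endIdx + (endTag.length : Int)))
        let truncated := pvATruncBlock n between
        pvALoop logC n fuel (endIdx + (endTag.length : Int))
          (acc ++ [PySem.List.slice logC (some pos) (some bi), truncated])

def truncate_model_final_output (log : String) (num_keep_lines_per_code_block : Int) : String :=
  String.mk (pvALoop log.toList num_keep_lines_per_code_block (log.toList.length + 1) 0 [])

-- ===== PORT B =====

-- B's `end_pos`: earliest end tag of s as (index, tag length)
def pvBEndPos (s : List Char) : Option (Int × Nat) :=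
  [pvEND1, pvEND2].foldl (fun best tag =>
    let i := PySem.Chars.find s tag
    match best with
    | none => if i ≠ -1 then some (i, tag.length) else none
    | some b => if i ≠ -1 ∧ i < b.1 then some (i, tag.length) else some b) none

-- B's `trunc`
def pvBTrunc (n : Int) (block : List Char) : List Char :=
  let lines := PySem.Chars.splitlines block
  if (lines.length : Int) > n then
    PySem.Chars.join "\n".toList (PySem.List.slice lines none (some n)) ++ "\n...[truncated]...\n".toList
  else block

-- B's outer while over the remaining segments; the merge branch is B's inner
-- `while ep is None and rest:` loop (it shortens the segment list by one each pass)
def pvBGo (n : Int) : List (List Char) → List (List Char)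
  | [] => []
  | body :: rest =>
    match pvBEndPos body with
    | none =>
      match rest with
      | [] => [pvBEGIN ++ body]
      | r :: rs => pvBGo n ((body ++ pvBEGIN ++ r) :: rs)
    | some (i, tl) =>
      let cut := i + (tl : Int)
      pvBTrunc n (pvBEGIN ++ PySem.List.slice body none (some cut)) ::
        PySem.List.slice body (some cut) none :: pvBGo n rest
termination_by l => l.length

def truncate_model_final_output_alt (log : String) (num_keep_lines_per_code_block : Int) : String :=
  -- segs[0] cannot raise: split always returns a non-empty list, so headI is exact
  let segs := PySem.Chars.splitOn log.toList pvBEGIN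
  String.mk (PySem.Chars.join [] (segs.headI :: pvBGo num_keep_lines_per_code_block segs.tail))

-- ===== PRECONDITION & SPEC =====
def Spec_truncate_model_final_output (log : String) (num_keep_lines_per_code_block : Int) (out : String) : Prop := out = truncate_model_final_output_alt log num_keep_lines_per_code_block
instance (log : String) (num_keep_lines_per_code_block : Int) (out : String) : Decidable (Spec_truncate_model_final_output log num_keep_lines_per_code_block out) := by unfold Spec_truncate_model_final_output; infer_instance

-- ===== CLAIM (what is proved, stated in full; the proofs are below) =====
def Claim_equal_truncate_model_final_output : Prop := ∀ (log : String) (num_keep_lines_per_code_block : Int), Dom_truncate_model_final_output log num_keep_lines_per_code_block → Spec_truncate_model_final_output log num_keep_lines_per_code_block (truncate_model_final_output log num_keep_lines_per_code_block)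

-- ===== LEMMAS AND PROOFS =====

-- ---------- find toolkit ----------
theorem pvGoNil (sub : List Char) (k : Nat) :
    PySem.Chars.find.go sub [] k = if sub.isEmpty then (k : Int) else -1 := by
  simp [PySem.Chars.find.go]

theorem pvGoCons (sub : List Char) (c : Char) (l : List Char) (k : Nat) :
    PySem.Chars.find.go sub (c :: l) k =
      if sub.isPrefixOf (c :: l) then (k : Int) else PySem.Chars.find.go sub l (k + 1) := by
  simp [PySem.Chars.find.go]

theorem pvFindGo (sub l : List Char) : ∀ k : Nat,
    PySem.Chars.find.go sub l k =
      if PySem.Chars.find l sub = -1 then -1 else (k : Int) + PySem.Chars.find l sub := by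
  induction l with
  | nil =>
    intro k
    simp only [PySem.Chars.find, pvGoNil]
    split_ifs <;> simp_all
  | cons c t ih =>
    intro k
    simp only [PySem.Chars.find, pvGoCons]
    by_cases hp : sub.isPrefixOf (c :: t)
    · simp [hp]
    · simp only [hp]
      rw [ih (k + 1), ih 1]
      by_cases h : PySem.Chars.find t sub = -1
      · simp [h]
      · have h0 : 0 ≤ PySem.Chars.find t sub := by
          have := PySem.Chars.neg_one_le_find t sub; omega
        have h1 : 1 + PySem.Chars.find t sub ≠ -1 := by omega
        simp [h, h1]
        ring

theorem pvFindCons (sub : List Char) (c : Char) (t : List Char) :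
    PySem.Chars.find (c :: t) sub =
      if sub <+: (c :: t) then 0
      else if PySem.Chars.find t sub = -1 then -1 else 1 + PySem.Chars.find t sub := by
  conv_lhs => rw [PySem.Chars.find, pvGoCons, pvFindGo]
  simp [List.isPrefixOf_iff_prefix]

-- find = a from an occurrence at a that is minimal
theorem pvFindEqOf {l sub : List Char} {a : Nat} (h : sub <+: l.drop a)
    (hmin : ∀ b < a, ¬ sub <+: l.drop b) : PySem.Chars.find l sub = (a : Int) := by
  have hinf : sub <:+: l := h.isInfix.trans (List.drop_suffix a l).isInfix
  have hne : PySem.Chars.find l sub ≠ -1 := (PySem.Chars.find_ne_neg_one_iff l sub).2 hinf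
  have h0 : 0 ≤ PySem.Chars.find l sub := by
    have := PySem.Chars.neg_one_le_find l sub
    omega
  obtain ⟨hpre, hm⟩ := PySem.Chars.find_spec h0
  have h1 : ¬ (PySem.Chars.find l sub).toNat < a := fun hlt => hmin _ hlt hpre
  have h2 : ¬ a < (PySem.Chars.find l sub).toNat := fun hlt => hm a hlt h
  omega

-- no occurrence anywhere ⇒ find = -1
theorem pvFindNegOf {l sub : List Char} (h : ∀ a : Nat, ¬ sub <+: l.drop a) :
    PySem.Chars.find l sub = -1 := by
  rw [PySem.Chars.find_eq_neg_one_iff]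
  intro hinf
  have := (PySem.Chars.exists_prefix_drop_iff_isIn sub l).2 ((PySem.Chars.isIn_iff_infix sub l).2 hinf)
  obtain ⟨j, hj⟩ := this
  exact h j hj

-- occurrence at the position find points to, when find ≥ 0 (restated with toNat)
theorem pvFindOcc {l sub : List Char} {a : Nat} (h : PySem.Chars.find l sub = (a : Int)) :
    sub <+: l.drop a ∧ ∀ b < a, ¬ sub <+: l.drop b := by
  have h0 : 0 ≤ PySem.Chars.find l sub := by rw [h]; positivity
  obtain ⟨hpre, hm⟩ := PySem.Chars.find_spec h0
  rw [h] at hpre hm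
  simpa using ⟨hpre, hm⟩

theorem pvFindCases (l sub : List Char) :
    PySem.Chars.find l sub = -1 ∨ ∃ a : Nat, PySem.Chars.find l sub = (a : Int) := by
  have := PySem.Chars.neg_one_le_find l sub
  rcases eq_or_lt_of_le this with h | h
  · exact Or.inl h.symm
  · exact Or.inr ⟨(PySem.Chars.find l sub).toNat, by omega⟩

-- an occurrence fits: a + |sub| ≤ |l|
theorem pvOccFits {l sub : List Char} {a : Nat} (hs : sub ≠ []) (h : sub <+: l.drop a) :
    a + sub.length ≤ l.length := by
  have h1 := h.length_le
  have h2 : 0 < sub.length := List.length_pos_iff.2 hs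
  simp [List.length_drop] at h1
  omega

-- ---------- tag separation: occurrences of '<'-headed tags never overlap ----------
-- both tags start with '<' and contain '<' nowhere else, so two occurrences are equal or disjoint
theorem pvSep {w T U : List Char} {a b : Nat}
    (hT : T <+: w.drop a) (hU : U <+: w.drop b)
    (hTc : ∀ m, (hm : m < T.length) → (T[m] = '<' ↔ m = 0))
    (hUc : ∀ m, (hm : m < U.length) → (U[m] = '<' ↔ m = 0))
    (hTn : T ≠ []) (hUn : U ≠ []) :
    a = b ∨ a + T.length ≤ b ∨ b + U.length ≤ a := by
  have hTl : 0 < T.length := List.length_pos_iff.2 hTn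
  have hUl : 0 < U.length := List.length_pos_iff.2 hUn
  have hTg : ∀ m, (hm : m < T.length) → w[a + m]? = some (T[m]'hm) := by
    intro m hm
    have h1 : (w.drop a)[m]? = some (T[m]'hm) := by
      rw [List.getElem?_eq_getElem (hT.length_le.trans_lt' hm)]
      exact congrArg some (List.IsPrefix.getElem hT hm).symm
    rwa [List.getElem?_drop] at h1
  have hUg : ∀ m, (hm : m < U.length) → w[b + m]? = some (U[m]'hm) := by
    intro m hm
    have h1 : (w.drop b)[m]? = some (U[m]'hm) := by
      rw [List.getElem?_eq_getElem (hU.length_le.trans_lt' hm)]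
      exact congrArg some (List.IsPrefix.getElem hU hm).symm
    rwa [List.getElem?_drop] at h1
  by_contra hcon
  push_neg at hcon
  obtain ⟨hab, h1, h2⟩ := hcon
  rcases Nat.lt_or_ge a b with hlt | hge
  · -- a < b < a + |T| : T[b-a] = U[0] = '<' with b-a ≥ 1
    have hm : b - a < T.length := by omega
    have e3 := hUg 0 hUl
    have e4 := hTg (b - a) hm
    rw [show b + 0 = a + (b - a) by omega, e4] at e3
    have e1 : T[b - a]'hm = '<' := by
      have := Option.some.inj e3
      rw [this]
      exact (hUc 0 hUl).2 rfl
    have := (hTc (b - a) hm).1 e1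
    omega
  · -- b < a < b + |U| : U[a-b] = T[0] = '<' with a-b ≥ 1
    have hm : a - b < U.length := by omega
    have e3 := hTg 0 hTl
    have e4 := hUg (a - b) hm
    rw [show a + 0 = b + (a - b) by omega, e4] at e3
    have e1 : U[a - b]'hm = '<' := by
      have := Option.some.inj e3
      rw [this]
      exact (hTc 0 hTl).2 rfl
    have := (hUc (a - b) hm).1 e1
    omega

theorem pvSepNe {w T U : List Char} {a b : Nat}
    (hT : T <+: w.drop a) (hU : U <+: w.drop b)
    (hTc : ∀ m, (hm : m < T.length) → (T[m] = '<' ↔ m = 0))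
    (hUc : ∀ m, (hm : m < U.length) → (U[m] = '<' ↔ m = 0))
    (hTn : T ≠ []) (hUn : U ≠ [])
    (hT2 : 2 ≤ T.length) (hU2 : 2 ≤ U.length) (hne : T[1]? ≠ U[1]?) :
    a + T.length ≤ b ∨ b + U.length ≤ a := by
  rcases pvSep hT hU hTc hUc hTn hUn with heq | h | h
  · exfalso
    subst heq
    have e1 : (w.drop a)[1]? = T[1]? := by
      rw [List.getElem?_eq_getElem (by omega : 1 < T.length), List.getElem?_eq_getElem (hT.length_le.trans_lt' (by omega))]
      exact congrArg some (List.IsPrefix.getElem hT (by omega)).symm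
    have e2 : (w.drop a)[1]? = U[1]? := by
      rw [List.getElem?_eq_getElem (by omega : 1 < U.length), List.getElem?_eq_getElem (hU.length_le.trans_lt' (by omega))]
      exact congrArg some (List.IsPrefix.getElem hU (by omega)).symm
    exact hne (e1 ▸ e2 ▸ rfl)
  · exact Or.inl h
  · exact Or.inr h

-- the concrete tags satisfy the '<'-only-at-0 condition
theorem pvTcB : ∀ m, (hm : m < pvBEGIN.length) → (pvBEGIN[m] = '<' ↔ m = 0) := by decide
theorem pvTcE1 : ∀ m, (hm : m < pvEND1.length) → (pvEND1[m] = '<' ↔ m = 0) := by decide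
theorem pvTcE2 : ∀ m, (hm : m < pvEND2.length) → (pvEND2[m] = '<' ↔ m = 0) := by decide
theorem pvBne : pvBEGIN ≠ [] := by decide
theorem pvE1ne : pvEND1 ≠ [] := by decide
theorem pvE2ne : pvEND2 ≠ [] := by decide
theorem pvBlen : pvBEGIN.length = 13 := by decide
theorem pvE1len : pvEND1.length = 11 := by decide
theorem pvE2len : pvEND2.length = 12 := by decide

-- an end-tag occurrence and a begin-tag occurrence are disjoint
theorem pvSepE1B {w : List Char} {a b : Nat}
    (hT : pvEND1 <+: w.drop a) (hU : pvBEGIN <+: w.drop b) :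
    a + 11 ≤ b ∨ b + 13 ≤ a := by
  have := pvSepNe hT hU pvTcE1 pvTcB pvE1ne pvBne (by decide) (by decide) (by decide)
  simpa [pvE1len, pvBlen] using this

theorem pvSepE2B {w : List Char} {a b : Nat}
    (hT : pvEND2 <+: w.drop a) (hU : pvBEGIN <+: w.drop b) :
    a + 12 ≤ b ∨ b + 13 ≤ a := by
  have := pvSepNe hT hU pvTcE2 pvTcB pvE2ne pvBne (by decide) (by decide) (by decide)
  simpa [pvE2len, pvBlen] using this

-- two begin-tag occurrences are equal or disjoint
theorem pvSepBB {w : List Char} {a b : Nat}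
    (hT : pvBEGIN <+: w.drop a) (hU : pvBEGIN <+: w.drop b) :
    a = b ∨ a + 13 ≤ b ∨ b + 13 ≤ a := by
  have := pvSep hT hU pvTcB pvTcB pvBne pvBne
  simpa [pvBlen] using this

-- ---------- occurrences in  x ++ <BEGIN_FILES> ++ y ----------
theorem pvNoOcc {l sub : List Char} (h : PySem.Chars.find l sub = -1) :
    ∀ a : Nat, ¬ sub <+: l.drop a := by
  intro a ha
  exact (PySem.Chars.find_eq_neg_one_iff l sub).1 h (ha.isInfix.trans (List.drop_suffix a l).isInfix)

theorem pvOccB (x y : List Char) : pvBEGIN <+: (x ++ (pvBEGIN ++ y)).drop x.length := by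
  rw [List.drop_left]
  exact List.prefix_append _ _

theorem pvDropApp {x : List Char} (y : List Char) {a : Nat} (h : a ≤ x.length) :
    (x ++ (pvBEGIN ++ y)).drop a = x.drop a ++ pvBEGIN ++ y := by
  rw [List.drop_append, Nat.sub_eq_zero_of_le h, List.drop_zero, List.append_assoc]

theorem pvTakeApp {x : List Char} (y : List Char) {a : Nat} (h : a ≤ x.length) :
    (x ++ (pvBEGIN ++ y)).take a = x.take a := by
  rw [← List.append_assoc, List.take_append_of_le_length (by simp; omega)]
  exact List.take_append_of_le_length h

theorem pvOA {x y T : List Char} {a : Nat} (h : a + T.length ≤ x.length) :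
    (T <+: (x ++ (pvBEGIN ++ y)).drop a ↔ T <+: x.drop a) := by
  rw [pvDropApp y (by omega), List.append_assoc]
  constructor
  · intro hp
    rw [List.prefix_iff_eq_take] at hp ⊢
    rwa [List.take_append_of_le_length (by simp [List.length_drop]; omega)] at hp
  · exact fun hp => List.prefix_append_of_prefix hp

theorem pvOB {x y : List Char} {p : Nat} (h : x.length + 13 ≤ p) :
    (x ++ (pvBEGIN ++ y)).drop p = y.drop (p - (x.length + 13)) := by
  rw [List.drop_append, List.drop_eq_nil_of_le (by omega), List.drop_append, List.drop_eq_nil_of_le (by rw [pvBlen]; omega)]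
  simp only [List.nil_append, pvBlen, Nat.sub_sub]

-- find over  x ++ BEGIN ++ y  for an end tag: found in x, else shifted from y
theorem pvFindAppendEnd {x y T : List Char} (hTn : T ≠ [])
    (hsep : ∀ (w : List Char) (a b : Nat), T <+: w.drop a → pvBEGIN <+: w.drop b →
      a + T.length ≤ b ∨ b + 13 ≤ a) :
    PySem.Chars.find (x ++ (pvBEGIN ++ y)) T =
      if PySem.Chars.find x T ≠ -1 then PySem.Chars.find x T
      else if PySem.Chars.find y T = -1 then -1
      else (x.length : Int) + 13 + PySem.Chars.find y T := by
  have hOC : ∀ p : Nat, T <+: (x ++ (pvBEGIN ++ y)).drop p →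
      p + T.length ≤ x.length ∨ x.length + 13 ≤ p :=
    fun p hp => hsep _ p x.length hp (pvOccB x y)
  rcases pvFindCases x T with hx | ⟨a, hx⟩
  · rcases pvFindCases y T with hy | ⟨c, hy⟩
    · rw [pvFindNegOf, hx, hy]
      · simp
      · intro p hp
        rcases hOC p hp with h | h
        · exact pvNoOcc hx p ((pvOA h).1 hp)
        · rw [pvOB h] at hp
          exact pvNoOcc hy _ hp
    · have hocc : T <+: (x ++ (pvBEGIN ++ y)).drop (x.length + 13 + c) := by
        rw [pvOB (by omega)]
        simpa using (pvFindOcc hy).1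
      have := pvFindEqOf hocc (by
        intro b hb hbp
        rcases hOC b hbp with h | h
        · exact pvNoOcc hx b ((pvOA h).1 hbp)
        · rw [pvOB h] at hbp
          exact (pvFindOcc hy).2 _ (by omega) hbp)
      rw [this, hx, hy]
      simp
  · have ha := (pvFindOcc hx).1
    have hax : a + T.length ≤ x.length := by
      have := (pvFindOcc hx).1.length_le
      simp [List.length_drop] at this
      have hTl : 0 < T.length := List.length_pos_iff.2 hTn
      omega
    have hocc : T <+: (x ++ (pvBEGIN ++ y)).drop a := (pvOA hax).2 ha
    have := pvFindEqOf hocc (by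
      intro b hb hbp
      rcases hOC b hbp with h | h
      · exact (pvFindOcc hx).2 b hb ((pvOA h).1 hbp)
      · omega)
    rw [this, hx]
    simp

-- find over  x ++ BEGIN ++ y  for the begin tag, when x is clean
theorem pvFindAppendB {x : List Char} (y : List Char)
    (hx : PySem.Chars.find x pvBEGIN = -1) :
    PySem.Chars.find (x ++ (pvBEGIN ++ y)) pvBEGIN = (x.length : Int) := by
  refine pvFindEqOf (pvOccB x y) ?_
  intro b hb hbp
  rcases pvSepBB hbp (pvOccB x y) with h | h | h
  · omega
  · exact pvNoOcc hx b ((pvOA (by rw [pvBlen]; omega)).1 hbp)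
  · omega

-- ---------- splitOn machinery ----------
theorem pvFindNil {sep : List Char} (h : sep ≠ []) : PySem.Chars.find [] sep = -1 := by
  rw [PySem.Chars.find, pvGoNil]
  simp [h]

theorem pvFindPrefix {l sep : List Char} (h : sep <+: l) : PySem.Chars.find l sep = 0 := by
  have := pvFindEqOf (a := 0) (by simpa using h) (by omega)
  simpa using this

theorem pvSplitGoNil (sep cur : List Char) (acc : List (List Char)) (fuel : Nat) :
    PySem.Chars.splitOn.go sep (fuel + 1) [] cur acc = (cur.reverse :: acc).reverse := by
  simp [PySem.Chars.splitOn.go]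

theorem pvSplitGoCons (sep : List Char) (fuel : Nat) (c : Char) (t cur : List Char) (acc : List (List Char)) :
    PySem.Chars.splitOn.go sep (fuel + 1) (c :: t) cur acc =
      if sep.isPrefixOf (c :: t) then
        PySem.Chars.splitOn.go sep fuel ((c :: t).drop sep.length) [] (cur.reverse :: acc)
      else PySem.Chars.splitOn.go sep fuel t (c :: cur) acc := by
  simp [PySem.Chars.splitOn.go]

-- proof-side reformulation of splitOn's accumulator loop
def pvSG (sep : List Char) : List Char → List Char → List (List Char)
  | l, cur =>
    if h : sep ≠ [] ∧ sep <+: l then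
      cur :: pvSG sep (l.drop sep.length) []
    else
      match l with
      | [] => [cur]
      | c :: t => pvSG sep t (cur ++ [c])
termination_by l _ => l.length
decreasing_by
  · have h1 : 0 < sep.length := List.length_pos_iff.2 h.1
    have h2 : sep.length ≤ l.length := h.2.length_le
    simp
    omega
  · simp

theorem pvSGeqPos {sep l : List Char} (cur : List Char) (h : sep ≠ [] ∧ sep <+: l) :
    pvSG sep l cur = cur :: pvSG sep (l.drop sep.length) [] := by
  rw [pvSG, dif_pos h]

theorem pvSGeqNil (sep cur : List Char) : pvSG sep [] cur = [cur] := by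
  rw [pvSG, dif_neg]
  rintro ⟨h1, h2⟩
  exact h1 (List.prefix_nil.mp h2)

theorem pvSGeqConsNeg {sep : List Char} {c : Char} {t : List Char} (cur : List Char)
    (hp : ¬ sep <+: (c :: t)) : pvSG sep (c :: t) cur = pvSG sep t (cur ++ [c]) := by
  rw [pvSG, dif_neg (by simp [hp])]

theorem pvSGO (sep : List Char) (hsep : sep ≠ []) : ∀ (fuel : Nat) (l cur : List Char) (acc : List (List Char)),
    l.length < fuel →
    PySem.Chars.splitOn.go sep fuel l cur acc = acc.reverse ++ pvSG sep l cur.reverse := by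
  intro fuel
  induction fuel with
  | zero => omega
  | succ fuel ih =>
    intro l cur acc hl
    match l with
    | [] =>
      rw [pvSplitGoNil, pvSGeqNil]
      simp
    | c :: t =>
      rw [pvSplitGoCons]
      have h1 : 0 < sep.length := List.length_pos_iff.2 hsep
      have hlt : t.length + 1 < fuel + 1 := by simpa using hl
      by_cases hp : sep.isPrefixOf (c :: t)
      · have hp' : sep <+: (c :: t) := List.isPrefixOf_iff_prefix.1 hp
        rw [if_pos hp, pvSGeqPos _ ⟨hsep, hp'⟩]
        rw [ih ((c :: t).drop sep.length) [] _ (by simp; omega)]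
        simp
      · have hp' : ¬ sep <+: (c :: t) := fun h => hp (List.isPrefixOf_iff_prefix.2 h)
        rw [if_neg hp, pvSGeqConsNeg _ hp']
        rw [ih t (c :: cur) acc (by omega)]
        simp

theorem pvSPL1 (s sep : List Char) (hsep : sep ≠ []) :
    PySem.Chars.splitOn s sep = pvSG sep s [] := by
  rw [PySem.Chars.splitOn, pvSGO sep hsep _ _ _ _ (by omega)]
  simp

theorem pvSGNeg (sep : List Char) (hsep : sep ≠ []) : ∀ (N : Nat) (l cur : List Char), l.length ≤ N →
    PySem.Chars.find l sep = -1 → pvSG sep l cur = [cur ++ l] := by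
  intro N
  induction N with
  | zero =>
    intro l cur hl _
    have : l = [] := List.length_eq_zero_iff.1 (by omega)
    subst this
    rw [pvSGeqNil]
    simp
  | succ N ih =>
    intro l cur hl hf
    rcases l with _ | ⟨c, t⟩
    · rw [pvSGeqNil]
      simp
    · have hp : ¬ sep <+: (c :: t) := by
        intro hp
        rw [pvFindPrefix hp] at hf
        omega
      rw [pvFindCons] at hf
      rw [if_neg hp] at hf
      have hft : PySem.Chars.find t sep = -1 := by
        by_cases h : PySem.Chars.find t sep = -1
        · exact h
        · have := PySem.Chars.neg_one_le_find t sep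
          rw [if_neg h] at hf
          omega
      rw [pvSGeqConsNeg _ hp]
      rw [ih t (cur ++ [c]) (by simp at hl ⊢; omega) hft]
      simp

theorem pvSGPos (sep : List Char) (hsep : sep ≠ []) : ∀ (N : Nat) (l cur : List Char) (a : Nat), l.length ≤ N →
    PySem.Chars.find l sep = (a : Int) →
    pvSG sep l cur = (cur ++ l.take a) :: pvSG sep (l.drop (a + sep.length)) [] := by
  intro N
  induction N with
  | zero =>
    intro l cur a hl hf
    have : l = [] := List.length_eq_zero_iff.1 (by omega)
    subst this
    rw [pvFindNil hsep] at hf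
    omega
  | succ N ih =>
    intro l cur a hl hf
    by_cases hp : sep <+: l
    · have h0 := pvFindPrefix hp
      rw [h0] at hf
      have ha : a = 0 := by omega
      subst ha
      rw [pvSGeqPos _ ⟨hsep, hp⟩]
      simp
    · rcases l with _ | ⟨c, t⟩
      · rw [pvFindNil hsep] at hf
        omega
      · rw [pvFindCons, if_neg hp] at hf
        have hge := PySem.Chars.neg_one_le_find t sep
        by_cases h : PySem.Chars.find t sep = -1
        · rw [if_pos h] at hf
          omega
        · rw [if_neg h] at hf
          obtain ⟨b, rfl⟩ : ∃ b, a = b + 1 := ⟨a - 1, by omega⟩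
          have hft : PySem.Chars.find t sep = (b : Int) := by push_cast at hf ⊢; omega
          rw [pvSGeqConsNeg _ hp]
          rw [ih t (cur ++ [c]) b (by simp at hl ⊢; omega) hft]
          have h3 : (c :: t).drop (b + 1 + sep.length) = t.drop (b + sep.length) := by
            rw [show b + 1 + sep.length = (b + sep.length) + 1 by omega, List.drop_succ_cons]
          rw [h3]
          simp

theorem pvSplitNeg {s : List Char} (h : PySem.Chars.find s pvBEGIN = -1) :
    PySem.Chars.splitOn s pvBEGIN = [s] := by
  rw [pvSPL1 s pvBEGIN pvBne, pvSGNeg pvBEGIN pvBne s.length s [] le_rfl h]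
  simp

theorem pvSplitPos {s : List Char} {a : Nat} (h : PySem.Chars.find s pvBEGIN = (a : Int)) :
    PySem.Chars.splitOn s pvBEGIN =
      s.take a :: PySem.Chars.splitOn (s.drop (a + 13)) pvBEGIN := by
  rw [pvSPL1 s pvBEGIN pvBne, pvSGPos pvBEGIN pvBne s.length s [] a le_rfl h]
  rw [pvSPL1 _ pvBEGIN pvBne]
  simp [pvBlen]

-- ---------- split segment facts ----------
theorem pvHeadClean {s : List Char} {a : Nat} (h : PySem.Chars.find s pvBEGIN = (a : Int)) :
    PySem.Chars.find (s.take a) pvBEGIN = -1 := by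
  apply pvFindNegOf
  intro b hb
  rw [List.drop_take] at hb
  have hocc : pvBEGIN <+: s.drop b := hb.trans (List.take_prefix _ _)
  have hlen := hb.length_le
  rw [pvBlen] at hlen
  simp at hlen
  exact (pvFindOcc h).2 b (by omega) hocc

theorem pvCleanDrop {r : List Char} (h : PySem.Chars.find r pvBEGIN = -1) (m : Nat) :
    PySem.Chars.find (r.drop m) pvBEGIN = -1 := by
  apply pvFindNegOf
  intro b hb
  rw [List.drop_drop] at hb
  exact pvNoOcc h _ hb

theorem pvSplitClean : ∀ (N : Nat) (u : List Char), u.length ≤ N →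
    ∀ seg ∈ PySem.Chars.splitOn u pvBEGIN, PySem.Chars.find seg pvBEGIN = -1 := by
  intro N
  induction N with
  | zero =>
    intro u hu seg hseg
    have : u = [] := List.length_eq_zero_iff.1 (by omega)
    subst this
    rw [pvSplitNeg (pvFindNil pvBne)] at hseg
    simp at hseg
    subst hseg
    exact pvFindNil pvBne
  | succ N ih =>
    intro u hu seg hseg
    rcases pvFindCases u pvBEGIN with h | ⟨a, h⟩
    · rw [pvSplitNeg h] at hseg
      simp at hseg
      subst hseg
      exact h
    · rw [pvSplitPos h] at hseg
      have hfit := pvOccFits pvBne (pvFindOcc h).1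
      rw [pvBlen] at hfit
      simp only [List.mem_cons] at hseg
      rcases hseg with rfl | hseg
      · exact pvHeadClean h
      · exact ih (u.drop (a + 13)) (by simp; omega) seg hseg

theorem pvDropOccB {s : List Char} {a : Nat} (h : pvBEGIN <+: s.drop a) :
    s.drop a = pvBEGIN ++ s.drop (a + 13) := by
  conv_lhs => rw [← List.take_append_drop 13 (s.drop a)]
  rw [List.drop_drop]
  congr 1
  have h2 := List.prefix_iff_eq_take.1 h
  rw [pvBlen] at h2
  exact h2.symm

theorem pvJoinSplit : ∀ (N : Nat) (u : List Char), u.length ≤ N →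
    PySem.Chars.join pvBEGIN (PySem.Chars.splitOn u pvBEGIN) = u := by
  intro N
  induction N with
  | zero =>
    intro u hu
    have : u = [] := List.length_eq_zero_iff.1 (by omega)
    subst this
    rw [pvSplitNeg (pvFindNil pvBne), PySem.Chars.join_singleton]
  | succ N ih =>
    intro u hu
    rcases pvFindCases u pvBEGIN with h | ⟨a, h⟩
    · rw [pvSplitNeg h, PySem.Chars.join_singleton]
    · rw [pvSplitPos h]
      have hfit := pvOccFits pvBne (pvFindOcc h).1
      rw [pvBlen] at hfit
      have hne : PySem.Chars.splitOn (u.drop (a + 13)) pvBEGIN ≠ [] := by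
        rcases pvFindCases (u.drop (a + 13)) pvBEGIN with h2 | ⟨b, h2⟩
        · rw [pvSplitNeg h2]; simp
        · rw [pvSplitPos h2]; simp
      rcases hr : PySem.Chars.splitOn (u.drop (a + 13)) pvBEGIN with _ | ⟨r, rs⟩
      · exact absurd hr hne
      · rw [PySem.Chars.join_cons_cons]
        rw [← hr, ih (u.drop (a + 13)) (by simp; omega)]
        rw [List.append_assoc, ← pvDropOccB (pvFindOcc h).1]
        exact List.take_append_drop a u

-- ---------- end-tag search facts ----------
theorem pvEndPosEq (s : List Char) : pvBEndPos s =
    (if PySem.Chars.find s pvEND1 = -1 then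
      (if PySem.Chars.find s pvEND2 = -1 then none
       else some (PySem.Chars.find s pvEND2, 12))
     else if PySem.Chars.find s pvEND2 ≠ -1 ∧ PySem.Chars.find s pvEND2 < PySem.Chars.find s pvEND1 then
       some (PySem.Chars.find s pvEND2, 12)
     else some (PySem.Chars.find s pvEND1, 11)) := by
  simp only [pvBEndPos, List.foldl, pvE1len, pvE2len]
  by_cases h1 : PySem.Chars.find s pvEND1 = -1 <;>
    by_cases h2 : PySem.Chars.find s pvEND2 = -1 <;>
      simp [h1, h2]

theorem pvEndPosNone {s : List Char} :
    pvBEndPos s = none ↔ (PySem.Chars.find s pvEND1 = -1 ∧ PySem.Chars.find s pvEND2 = -1) := by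
  rw [pvEndPosEq]
  split_ifs with h1 h2 h3 <;> simp_all

theorem pvEndPosOcc {t : List Char} {j : Int} {tl : Nat} (h : pvBEndPos t = some (j, tl)) :
    ∃ a : Nat, j = (a : Int) ∧
      ((tl = 11 ∧ pvEND1 <+: t.drop a) ∨ (tl = 12 ∧ pvEND2 <+: t.drop a)) := by
  rw [pvEndPosEq] at h
  split_ifs at h with h1 h2 h3
  · simp at h
    obtain ⟨hj, htl⟩ := h
    have hge := PySem.Chars.neg_one_le_find t pvEND2
    refine ⟨(PySem.Chars.find t pvEND2).toNat, by omega, Or.inr ⟨htl.symm, ?_⟩⟩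
    have h0 : 0 ≤ PySem.Chars.find t pvEND2 := by omega
    exact (PySem.Chars.find_spec h0).1
  · simp at h
    obtain ⟨hj, htl⟩ := h
    have hge := PySem.Chars.neg_one_le_find t pvEND2
    refine ⟨(PySem.Chars.find t pvEND2).toNat, by omega, Or.inr ⟨htl.symm, ?_⟩⟩
    have h0 : 0 ≤ PySem.Chars.find t pvEND2 := by
      obtain ⟨hne, _⟩ := h3
      omega
    exact (PySem.Chars.find_spec h0).1
  · simp at h
    obtain ⟨hj, htl⟩ := h
    have hge := PySem.Chars.neg_one_le_find t pvEND1
    refine ⟨(PySem.Chars.find t pvEND1).toNat, by omega, Or.inl ⟨htl.symm, ?_⟩⟩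
    have h0 : 0 ≤ PySem.Chars.find t pvEND1 := by omega
    exact (PySem.Chars.find_spec h0).1

-- bound: a found end tag lies inside the segment
theorem pvEndPosFits {t : List Char} {j : Int} {tl : Nat} (h : pvBEndPos t = some (j, tl)) :
    0 ≤ j ∧ j.toNat + tl ≤ t.length ∧ (tl = 11 ∨ tl = 12) := by
  obtain ⟨a, rfl, hocc | hocc⟩ := pvEndPosOcc h
  · have := pvOccFits pvE1ne hocc.2
    rw [pvE1len] at this
    simp [hocc.1]
    omega
  · have := pvOccFits pvE2ne hocc.2
    rw [pvE2len] at this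
    simp [hocc.1]
    omega

-- adapters of the separation lemmas in the form pvFindAppendEnd wants
theorem pvSepAdapt1 : ∀ (w : List Char) (a b : Nat), pvEND1 <+: w.drop a → pvBEGIN <+: w.drop b →
    a + pvEND1.length ≤ b ∨ b + 13 ≤ a := by
  intro w a b h1 h2
  rw [pvE1len]
  exact pvSepE1B h1 h2

theorem pvSepAdapt2 : ∀ (w : List Char) (a b : Nat), pvEND2 <+: w.drop a → pvBEGIN <+: w.drop b →
    a + pvEND2.length ≤ b ∨ b + 13 ≤ a := by
  intro w a b h1 h2
  rw [pvE2len]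
  exact pvSepE2B h1 h2

-- endPos over  x ++ BEGIN ++ y : a hit in x wins
theorem pvEndPosExt {x : List Char} (y : List Char) {j : Int} {tl : Nat}
    (h : pvBEndPos x = some (j, tl)) :
    pvBEndPos (x ++ (pvBEGIN ++ y)) = some (j, tl) := by
  have hf1 := pvFindAppendEnd (x := x) (y := y) pvE1ne pvSepAdapt1
  have hf2 := pvFindAppendEnd (x := x) (y := y) pvE2ne pvSepAdapt2
  have hb1 : PySem.Chars.find x pvEND1 ≤ x.length := PySem.Chars.find_le_length x pvEND1
  have hb2 : PySem.Chars.find x pvEND2 ≤ x.length := PySem.Chars.find_le_length x pvEND2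
  have hg1 := PySem.Chars.neg_one_le_find x pvEND1
  have hg2 := PySem.Chars.neg_one_le_find x pvEND2
  have hgy1 := PySem.Chars.neg_one_le_find y pvEND1
  have hgy2 := PySem.Chars.neg_one_le_find y pvEND2
  rw [pvEndPosEq] at h
  by_cases h1 : PySem.Chars.find x pvEND1 = -1
  · rw [if_pos h1] at h
    by_cases h2 : PySem.Chars.find x pvEND2 = -1
    · rw [if_pos h2] at h
      cases h
    · rw [if_neg h2] at h
      rw [if_pos h2] at hf2
      rw [if_neg (by simp [h1])] at hf1
      obtain ⟨hj, htl⟩ : PySem.Chars.find x pvEND2 = j ∧ 12 = tl := by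
        simpa using h
      by_cases hy1 : PySem.Chars.find y pvEND1 = -1
      · rw [if_pos hy1] at hf1
        rw [pvEndPosEq, hf1, if_pos rfl, hf2, if_neg h2, hj, htl]
      · rw [if_neg hy1] at hf1
        rw [pvEndPosEq, hf1, hf2]
        rw [if_neg (by omega), if_pos ⟨h2, by omega⟩, hj, htl]
  · rw [if_neg h1] at h
    rw [if_pos h1] at hf1
    by_cases h3 : PySem.Chars.find x pvEND2 ≠ -1 ∧ PySem.Chars.find x pvEND2 < PySem.Chars.find x pvEND1
    · rw [if_pos h3] at h
      rw [if_pos h3.1] at hf2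
      obtain ⟨hj, htl⟩ : PySem.Chars.find x pvEND2 = j ∧ 12 = tl := by
        simpa using h
      rw [pvEndPosEq, hf1, hf2]
      rw [if_neg h1, if_pos h3, hj, htl]
    · rw [if_neg h3] at h
      obtain ⟨hj, htl⟩ : PySem.Chars.find x pvEND1 = j ∧ 11 = tl := by
        simpa using h
      rw [pvEndPosEq, hf1]
      by_cases h2 : PySem.Chars.find x pvEND2 = -1
      · rw [if_neg (by simp [h2])] at hf2
        by_cases hy2 : PySem.Chars.find y pvEND2 = -1
        · rw [if_pos hy2] at hf2
          rw [hf2]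
          rw [if_neg h1, if_neg (by simp), hj, htl]
        · rw [if_neg hy2] at hf2
          rw [hf2]
          rw [if_neg h1, if_neg (by push_neg; intro _; omega), hj, htl]
      · rw [if_pos h2] at hf2
        rw [hf2]
        rw [if_neg h1, if_neg h3, hj, htl]

-- endPos over  x ++ BEGIN ++ y  when x has no end tag: shifted hit from y
theorem pvEndPosShift {x : List Char} (y : List Char) (h : pvBEndPos x = none) :
    pvBEndPos (x ++ (pvBEGIN ++ y)) =
      (pvBEndPos y).map (fun p => ((x.length : Int) + 13 + p.1, p.2)) := by
  obtain ⟨h1, h2⟩ := pvEndPosNone.1 h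
  have hf1 := pvFindAppendEnd (x := x) (y := y) pvE1ne pvSepAdapt1
  have hf2 := pvFindAppendEnd (x := x) (y := y) pvE2ne pvSepAdapt2
  rw [h1] at hf1
  rw [h2] at hf2
  simp at hf1 hf2
  have hgy1 := PySem.Chars.neg_one_le_find y pvEND1
  have hgy2 := PySem.Chars.neg_one_le_find y pvEND2
  rw [pvEndPosEq, hf1, hf2, pvEndPosEq (s := y)]
  split_ifs <;> simp_all <;> omega

-- ---------- canonical spec: process the remaining log / the inside of a block ----------
def pvClean (tl : List (List Char)) : Prop := ∀ seg ∈ tl, PySem.Chars.find seg pvBEGIN = -1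

def pvJ (H : List Char) : Prop := ∀ (j : Int) (tl : Nat), pvBEndPos H = some (j, tl) →
  PySem.Chars.find (H.drop (j.toNat + tl)) pvBEGIN = -1

mutual
  -- pvF n s: the processed form of a remaining suffix s of the log
  def pvF (n : Int) (s : List Char) : List Char :=
    if h : PySem.Chars.find s pvBEGIN = -1 then s
    else
      s.take (PySem.Chars.find s pvBEGIN).toNat ++
        pvFB n (s.drop ((PySem.Chars.find s pvBEGIN).toNat + 13))
  termination_by 2 * s.length + 1
  decreasing_by
    have hge := PySem.Chars.neg_one_le_find s pvBEGIN
    have h0 : 0 ≤ PySem.Chars.find s pvBEGIN := by omega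
    have hocc := (PySem.Chars.find_spec h0).1
    have hfit := pvOccFits pvBne hocc
    rw [pvBlen] at hfit
    simp
    omega

  -- pvFB n t: the processed form of BEGIN ++ t (t = text after an opening tag)
  def pvFB (n : Int) (t : List Char) : List Char :=
    match pvBEndPos t with
    | none => pvBEGIN ++ t
    | some (j, tl) =>
      pvBTrunc n (pvBEGIN ++ t.take (j.toNat + tl)) ++ pvF n (t.drop (j.toNat + tl))
  termination_by 2 * t.length + 2
  decreasing_by
    simp
end

theorem pvF_neg {s : List Char} (n : Int) (h : PySem.Chars.find s pvBEGIN = -1) :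
    pvF n s = s := by
  rw [pvF.eq_def, dif_pos h]

theorem pvF_pos {s : List Char} {a : Nat} (n : Int) (h : PySem.Chars.find s pvBEGIN = (a : Int)) :
    pvF n s = s.take a ++ pvFB n (s.drop (a + 13)) := by
  rw [pvF.eq_def, dif_neg (by rw [h]; omega)]
  rw [h]
  simp

theorem pvFB_none {t : List Char} (n : Int) (h : pvBEndPos t = none) :
    pvFB n t = pvBEGIN ++ t := by
  rw [pvFB.eq_def, h]

theorem pvFB_some {t : List Char} {j : Int} {tl : Nat} (n : Int) (h : pvBEndPos t = some (j, tl)) :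
    pvFB n t = pvBTrunc n (pvBEGIN ++ t.take (j.toNat + tl)) ++ pvF n (t.drop (j.toNat + tl)) := by
  rw [pvFB.eq_def, h]

-- join with empty separator is flatten
theorem pvJoinNil : ∀ l : List (List Char), PySem.Chars.join [] l = l.flatten := by
  intro l
  induction l with
  | nil => simp [PySem.Chars.join, List.intercalate]
  | cons p rest ih =>
    rcases rest with _ | ⟨q, rs⟩
    · simp [PySem.Chars.join_singleton]
    · rw [PySem.Chars.join_cons_cons]
      simp only [List.flatten_cons]
      rw [ih]
      simp

-- the log text represented by a tail of begin-separated segments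
def pvRep : List (List Char) → List Char
  | [] => []
  | r :: rs => pvBEGIN ++ r ++ pvRep rs

theorem pvRepCons (r : List Char) (rs : List (List Char)) :
    r ++ pvRep rs = PySem.Chars.join pvBEGIN (r :: rs) := by
  induction rs generalizing r with
  | nil => simp [pvRep, PySem.Chars.join_singleton]
  | cons q rs ih =>
    rw [PySem.Chars.join_cons_cons, ← ih q]
    simp [pvRep]

theorem pvCleanJ {H : List Char} (h : PySem.Chars.find H pvBEGIN = -1) : pvJ H := by
  intro j tl _
  exact pvCleanDrop h _

theorem pvDropAppLen (x y : List Char) : (x ++ (pvBEGIN ++ y)).drop (x.length + 13) = y := by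
  rw [← List.append_assoc, show x.length + 13 = (x ++ pvBEGIN).length + 0 by simp [pvBlen],
    List.drop_length_add_append]
  simp

-- ---------- pvBGo equations ----------
theorem pvBGo_nil (n : Int) : pvBGo n [] = [] := by
  rw [pvBGo.eq_def]

theorem pvBGo_last {body : List Char} (n : Int) (h : pvBEndPos body = none) :
    pvBGo n [body] = [pvBEGIN ++ body] := by
  rw [pvBGo.eq_def]
  simp only [h]

theorem pvBGo_merge {body r : List Char} {rs : List (List Char)} (n : Int)
    (h : pvBEndPos body = none) :
    pvBGo n (body :: r :: rs) = pvBGo n ((body ++ pvBEGIN ++ r) :: rs) := by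
  rw [pvBGo.eq_def]
  simp only [h]

theorem pvBGo_found {body : List Char} {rest : List (List Char)} {j : Int} {tl : Nat} (n : Int)
    (h : pvBEndPos body = some (j, tl)) :
    pvBGo n (body :: rest) =
      pvBTrunc n (pvBEGIN ++ PySem.List.slice body none (some (j + (tl : Int)))) ::
        PySem.List.slice body (some (j + (tl : Int))) none :: pvBGo n rest := by
  rw [pvBGo.eq_def]
  simp only [h]

-- slice forms used by port B, on a found end position
theorem pvSliceTake {body : List Char} {j : Int} {tl : Nat} (h0 : 0 ≤ j) :
    PySem.List.slice body none (some (j + (tl : Int))) = body.take (j.toNat + tl) := by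
  rw [PySem.List.slice_to body (by omega)]
  congr 1
  omega

theorem pvSliceDrop {body : List Char} {j : Int} {tl : Nat} (h0 : 0 ≤ j) :
    PySem.List.slice body (some (j + (tl : Int))) none = body.drop (j.toNat + tl) := by
  rw [PySem.List.slice_from body (by omega)]
  congr 1
  omega

-- ---------- the heart: pvBGo computes pvFB on the represented text ----------
theorem pvP (n : Int) : ∀ (N : Nat) (tl : List (List Char)) (H : List Char), tl.length ≤ N →
    pvClean tl → pvJ H →
    (pvBGo n (H :: tl)).flatten = pvFB n (H ++ pvRep tl) := by
  intro N
  induction N with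
  | zero =>
    intro tl H htl hc hJ
    have : tl = [] := List.length_eq_zero_iff.1 (by omega)
    subst this
    rcases hEP : pvBEndPos H with _ | ⟨j, tl'⟩
    · rw [pvBGo_last n hEP]
      rw [show H ++ pvRep [] = H by simp [pvRep], pvFB_none n hEP]
      simp
    · obtain ⟨h0, hfit, -⟩ := pvEndPosFits hEP
      rw [pvBGo_found n hEP, pvSliceTake h0, pvSliceDrop h0]
      rw [show H ++ pvRep [] = H by simp [pvRep], pvFB_some n hEP]
      rw [pvF_neg n (hJ _ _ hEP)]
      simp [pvBGo_nil]
  | succ N ih =>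
    intro tl H htl hc hJ
    rcases tl with _ | ⟨r, rs⟩
    · exact ih [] H (by simp) hc hJ
    · have hcr : PySem.Chars.find r pvBEGIN = -1 := hc r (by simp)
      have hcrs : pvClean rs := fun seg hs => hc seg (by simp [hs])
      rcases hEP : pvBEndPos H with _ | ⟨j, tl'⟩
      · -- merge step
        rw [pvBGo_merge n hEP]
        have hJ' : pvJ (H ++ pvBEGIN ++ r) := by
          intro j2 tl2 hEP2
          rw [List.append_assoc] at hEP2
          rw [pvEndPosShift r hEP] at hEP2
          rcases hEPr : pvBEndPos r with _ | ⟨jr, tlr⟩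
          · rw [hEPr] at hEP2
            simp at hEP2
          · rw [hEPr] at hEP2
            obtain ⟨hjr0, hjrfit, -⟩ := pvEndPosFits hEPr
            simp at hEP2
            obtain ⟨hj2, htl2⟩ := hEP2
            rw [List.append_assoc]
            rw [show j2.toNat + tl2 = H.length + 13 + (jr.toNat + tlr) by omega]
            have : (H ++ (pvBEGIN ++ r)).drop (H.length + 13 + (jr.toNat + tlr)) =
                r.drop (jr.toNat + tlr) := by
              rw [← List.drop_drop, pvDropAppLen]
            rw [this]
            exact pvCleanDrop hcr _
        rw [ih rs (H ++ pvBEGIN ++ r) (by simp at htl ⊢; omega) hcrs hJ']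
        congr 1
        simp [pvRep]
      · -- end tag inside H: emit block and continue
        obtain ⟨h0, hfit, -⟩ := pvEndPosFits hEP
        rw [pvBGo_found n hEP, pvSliceTake h0, pvSliceDrop h0]
        have hrep : H ++ pvRep (r :: rs) = H ++ (pvBEGIN ++ (r ++ pvRep rs)) := by
          simp [pvRep]
        rw [hrep, pvFB_some n (pvEndPosExt (r ++ pvRep rs) hEP)]
        rw [pvTakeApp (r ++ pvRep rs) (by omega)]
        rw [pvDropApp (r ++ pvRep rs) (by omega)]
        have hHrem : PySem.Chars.find (H.drop (j.toNat + tl')) pvBEGIN = -1 := hJ _ _ hEP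
        rw [List.append_assoc]
        rw [pvF_pos (a := (H.drop (j.toNat + tl')).length) n (by
          exact pvFindAppendB (r ++ pvRep rs) hHrem)]
        rw [List.take_left, pvDropAppLen]
        have hJr : pvJ r := pvCleanJ hcr
        have hP := ih rs r (by simp at htl ⊢; omega) hcrs hJr
        simp only [List.flatten_cons]
        rw [hP]

-- ---------- A-side: the scan step seen from position pos ----------
theorem pvTruncEq : pvATruncBlock = pvBTrunc := rfl

theorem pvAEndIdxsEq (logC : List Char) (bi : Int) :
    pvAEndIdxs logC bi =
      (if PySem.Chars.findFrom logC pvEND1 bi ≠ -1 then [(PySem.Chars.findFrom logC pvEND1 bi, pvEND1)] else []) ++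
      (if PySem.Chars.findFrom logC pvEND2 bi ≠ -1 then [(PySem.Chars.findFrom logC pvEND2 bi, pvEND2)] else []) := by
  simp only [pvAEndIdxs, List.foldl]
  split_ifs <;> simp_all

theorem pvFindFromEnd {logC t : List Char} {p : Nat} (hp : p ≤ logC.length)
    (hdrop : logC.drop p = pvBEGIN ++ t) {T : List Char} (hTn : T ≠ [])
    (hadapt : ∀ (w : List Char) (a b : Nat), T <+: w.drop a → pvBEGIN <+: w.drop b →
      a + T.length ≤ b ∨ b + 13 ≤ a) :
    PySem.Chars.findFrom logC T (p : Int) =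
      if PySem.Chars.find t T = -1 then -1 else (p : Int) + 13 + PySem.Chars.find t T := by
  rw [PySem.Chars.findFrom_natCast logC T p hp, hdrop]
  have hb := pvFindAppendEnd (x := ([] : List Char)) (y := t) hTn hadapt
  rw [pvFindNil hTn] at hb
  simp at hb
  rw [hb]
  have hge := PySem.Chars.neg_one_le_find t T
  by_cases hf : PySem.Chars.find t T = -1 <;> simp [hf] <;> omega

-- when the block has no end tag, A collects no candidates
theorem pvAEndsNone {logC t : List Char} {p : Nat} (hp : p ≤ logC.length)
    (hdrop : logC.drop p = pvBEGIN ++ t) (hEP : pvBEndPos t = none) :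
    pvAEndIdxs logC (p : Int) = [] := by
  obtain ⟨h1, h2⟩ := pvEndPosNone.1 hEP
  rw [pvAEndIdxsEq]
  rw [pvFindFromEnd hp hdrop pvE1ne pvSepAdapt1, pvFindFromEnd hp hdrop pvE2ne pvSepAdapt2]
  simp [h1, h2]

-- when the block has an end tag, A's min-candidate is the endPos hit, shifted to absolute position
theorem pvAEndsSome {logC t : List Char} {p : Nat} {j : Int} {tl : Nat} (hp : p ≤ logC.length)
    (hdrop : logC.drop p = pvBEGIN ++ t) (hEP : pvBEndPos t = some (j, tl)) :
    ∃ tag : List Char,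
      pvAEndIdxs logC (p : Int) ≠ [] ∧
      PySem.List.minD (pvAEndIdxs logC (p : Int)) (fun x => x.1) (-1, []) =
        ((p : Int) + 13 + j, tag) ∧
      tag.length = tl := by
  have hf1 := pvFindFromEnd hp hdrop pvE1ne pvSepAdapt1
  have hf2 := pvFindFromEnd hp hdrop pvE2ne pvSepAdapt2
  have hg1 := PySem.Chars.neg_one_le_find t pvEND1
  have hg2 := PySem.Chars.neg_one_le_find t pvEND2
  rw [pvEndPosEq] at hEP
  rw [pvAEndIdxsEq, hf1, hf2]
  by_cases h1 : PySem.Chars.find t pvEND1 = -1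
  · rw [if_pos h1] at hEP
    by_cases h2 : PySem.Chars.find t pvEND2 = -1
    · rw [if_pos h2] at hEP
      cases hEP
    · rw [if_neg h2] at hEP
      obtain ⟨hj, htl⟩ : PySem.Chars.find t pvEND2 = j ∧ 12 = tl := by simpa using hEP
      subst hj
      subst htl
      have hne2 : (p : Int) + 13 + PySem.Chars.find t pvEND2 ≠ -1 := by omega
      refine ⟨pvEND2, ?_, ?_, by rw [pvE2len]⟩ <;>
        simp [h1, h2, hne2, PySem.List.minD, PySem.List.min?] <;> omega
  · rw [if_neg h1] at hEP
    by_cases h3 : PySem.Chars.find t pvEND2 ≠ -1 ∧ PySem.Chars.find t pvEND2 < PySem.Chars.find t pvEND1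
    · rw [if_pos h3] at hEP
      obtain ⟨hj, htl⟩ : PySem.Chars.find t pvEND2 = j ∧ 12 = tl := by simpa using hEP
      subst hj
      subst htl
      have hlt : (p : Int) + 13 + PySem.Chars.find t pvEND2 < (p : Int) + 13 + PySem.Chars.find t pvEND1 := by
        obtain ⟨-, hlt⟩ := h3
        omega
      have hne1 : (p : Int) + 13 + PySem.Chars.find t pvEND1 ≠ -1 := by omega
      have hne2 : (p : Int) + 13 + PySem.Chars.find t pvEND2 ≠ -1 := by
        obtain ⟨h2, -⟩ := h3
        omega
      refine ⟨pvEND2, ?_, ?_, by rw [pvE2len]⟩ <;>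
        simp [h1, h3.1, hne1, hne2, PySem.List.minD, PySem.List.min?, hlt] <;> omega
    · rw [if_neg h3] at hEP
      obtain ⟨hj, htl⟩ : PySem.Chars.find t pvEND1 = j ∧ 11 = tl := by simpa using hEP
      subst hj
      subst htl
      by_cases h2 : PySem.Chars.find t pvEND2 = -1
      · have hne1 : (p : Int) + 13 + PySem.Chars.find t pvEND1 ≠ -1 := by omega
        refine ⟨pvEND1, ?_, ?_, by rw [pvE1len]⟩ <;>
          simp [h1, h2, hne1, PySem.List.minD, PySem.List.min?] <;> omega
      · have hnlt : ¬ ((p : Int) + 13 + PySem.Chars.find t pvEND2 < (p : Int) + 13 + PySem.Chars.find t pvEND1) := by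
          push_neg at h3
          have := h3 h2
          omega
        have hne1 : (p : Int) + 13 + PySem.Chars.find t pvEND1 ≠ -1 := by omega
        have hne2 : (p : Int) + 13 + PySem.Chars.find t pvEND2 ≠ -1 := by omega
        refine ⟨pvEND1, ?_, ?_, by rw [pvE1len]⟩ <;>
          simp [h1, h2, hne1, hne2, PySem.List.minD, PySem.List.min?, hnlt] <;> omega

-- ---------- A's loop equals pvF on the remaining suffix ----------
theorem pvALoopEq (logC : List Char) (n : Int) : ∀ (fuel : Nat) (pos : Nat) (acc : List (List Char)),
    pos ≤ logC.length → logC.length - pos < fuel →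
    pvALoop logC n fuel (pos : Int) acc = acc.flatten ++ pvF n (logC.drop pos) := by
  intro fuel
  induction fuel with
  | zero =>
    intro pos acc h1 h2
    omega
  | succ fuel ih =>
    intro pos acc hpos hfuel
    simp only [pvALoop]
    rw [PySem.Chars.findFrom_natCast logC pvBEGIN pos hpos]
    rcases pvFindCases (logC.drop pos) pvBEGIN with h | ⟨i, h⟩
    · rw [h, if_pos (by norm_num)]
      rw [pvJoinNil]
      rw [PySem.List.slice_from logC (show (0 : Int) ≤ (pos : Int) by positivity)]
      rw [pvF_neg n h]
      simp
    · have hocc := (pvFindOcc h).1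
      have hfit : i + 13 ≤ (logC.drop pos).length := by
        have := pvOccFits pvBne hocc
        rwa [pvBlen] at this
      have hslen : (logC.drop pos).length = logC.length - pos := by simp
      have hdropit : (logC.drop pos).drop (i + 13) = logC.drop (pos + i + 13) := by
        rw [List.drop_drop]
        congr 1 <;> omega
      have hdrop : logC.drop (pos + i) = pvBEGIN ++ logC.drop (pos + i + 13) := by
        rw [← hdropit, ← pvDropOccB hocc]
        try rw [List.drop_drop]
      rw [h]
      rw [if_neg (show ¬ (i : Int) = -1 by omega)]
      have hcast : ((pos : Int) + (i : Int)) = ((pos + i : Nat) : Int) := by push_cast; ring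
      rw [hcast]
      rcases hEP : pvBEndPos (logC.drop (pos + i + 13)) with _ | ⟨j, tl⟩
      · -- block never closed: A appends the remainder and stops
        have hnone := pvAEndsNone (p := pos + i) (by omega) hdrop hEP
        rw [hnone]
        rw [if_pos rfl, if_pos rfl]
        rw [pvJoinNil]
        rw [PySem.List.slice_from logC (show (0 : Int) ≤ (pos : Int) by positivity)]
        rw [pvF_pos n h, hdropit, pvFB_none n hEP]
        rw [show (logC.drop pos).take i ++ (pvBEGIN ++ logC.drop (pos + i + 13)) =
              (logC.drop pos).take i ++ (logC.drop pos).drop i by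
            rw [pvDropOccB hocc, hdropit]]
        rw [List.take_append_drop]
        simp
      · -- block closes: emit prefix and truncated block, continue past the end tag
        obtain ⟨tag, hne, hmin, htag⟩ := pvAEndsSome (p := pos + i) (by omega) hdrop hEP
        obtain ⟨hj0, hjfit, -⟩ := pvEndPosFits hEP
        obtain ⟨a, hj, -⟩ := pvEndPosOcc hEP
        subst hj
        have htlen : (logC.drop (pos + i + 13)).length = logC.length - (pos + i + 13) := by simp
        rw [if_neg hne, hmin]
        simp only [Int.toNat_natCast] at hjfit
        rw [if_neg (by push_cast; omega), htag]
        have hb2 : ((pos + i : Nat) : Int) + 13 + (a : Int) + (tl : Int) =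
            ((pos + i + 13 + (a + tl) : Nat) : Int) := by push_cast; ring
        rw [hb2]
        rw [PySem.List.slice_natCast logC (pos + i) (pos + i + 13 + (a + tl))]
        rw [show pos + i + 13 + (a + tl) - (pos + i) = 13 + (a + tl) by omega]
        rw [hdrop]
        rw [show (13 : Nat) + (a + tl) = pvBEGIN.length + (a + tl) by rw [pvBlen]]
        rw [List.take_length_add_append]
        rw [PySem.List.slice_natCast logC pos (pos + i)]
        rw [show pos + i - pos = i by omega]
        rw [ih (pos + i + 13 + (a + tl)) _ (by omega) (by omega)]
        rw [pvF_pos n h, hdropit, pvFB_some n hEP]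
        rw [pvTruncEq]
        simp only [Int.toNat_natCast]
        rw [show logC.drop (pos + i + 13 + (a + tl)) =
              (logC.drop (pos + i + 13)).drop (a + tl) by
            rw [List.drop_drop]]
        simp [List.append_assoc]
        intro habs
        exfalso
        omega

-- ---------- B's driver computes pvF ----------
theorem pvSplitNeNil (u : List Char) : PySem.Chars.splitOn u pvBEGIN ≠ [] := by
  rcases pvFindCases u pvBEGIN with h | ⟨a, h⟩
  · rw [pvSplitNeg h]
    simp
  · rw [pvSplitPos h]
    simp

theorem pvBDriverAux (n : Int) (s : List Char) :
    PySem.Chars.join [] ((PySem.Chars.splitOn s pvBEGIN).headI ::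
      pvBGo n (PySem.Chars.splitOn s pvBEGIN).tail) = pvF n s := by
  rw [pvJoinNil]
  rcases pvFindCases s pvBEGIN with h | ⟨a, h⟩
  · rw [pvSplitNeg h, pvF_neg n h]
    simp [pvBGo_nil]
  · rw [pvSplitPos h]
    rcases hsp : PySem.Chars.splitOn (s.drop (a + 13)) pvBEGIN with _ | ⟨r, rs⟩
    · exact absurd hsp (pvSplitNeNil _)
    · have hclean := pvSplitClean (s.drop (a + 13)).length (s.drop (a + 13)) le_rfl
      rw [hsp] at hclean
      have hcr : PySem.Chars.find r pvBEGIN = -1 := hclean r (by simp)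
      have hcrs : pvClean rs := fun seg hs => hclean seg (by simp [hs])
      have hP := pvP n rs.length rs r le_rfl hcrs (pvCleanJ hcr)
      simp only [List.headI, List.tail_cons, List.flatten_cons]
      rw [hP]
      rw [show r ++ pvRep rs = s.drop (a + 13) by
        rw [pvRepCons, ← hsp, pvJoinSplit (s.drop (a + 13)).length _ le_rfl]]
      rw [pvF_pos n h]

-- ===== VERDICT (by name: the statement is the Claim_ definition above) =====
theorem truncate_model_final_output_spec : Claim_equal_truncate_model_final_output := by
  intro log n _
  unfold Spec_truncate_model_final_output
  unfold truncate_model_final_output truncate_model_final_output_alt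
  have hA := pvALoopEq log.toList n (log.toList.length + 1) 0 [] (by omega) (by omega)
  simp only [Nat.cast_zero, List.flatten_nil, List.drop_zero, List.nil_append] at hA
  rw [hA, ← pvBDriverAux n log.toList]
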